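-- pv_equiv track=rewrite | github.com/bisscay/advent-of-code-2021 | Day4/GiantSquid.py | get_column_sum
-- ===== SOURCE A (Python) =====
-- def get_column_sum(board, current_i, j, draw_set):
--     sum = 0 # No need computing
--     for i in range(len(board)):
--         if board[i][j] in draw_set:
--             sum += int(board[i][j])
--         else:
--             return (0, current_i + max(i-current_i, 1))
--     return (sum, len(board)-1)
-- ===== SOURCE B (Python) =====
-- def get_column_sum(board, current_i, j, draw_set):
--     idx = next((i for i in range(len(board)) if board[i][j] not in draw_set), None)
--     if idx is None:
--         return (sum(int(board[i][j]) for i in range(len(board))), len(board) - 1)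
--     return (0, current_i + max(idx - current_i, 1))
-- ===== Notes on version B (the rewrite author's own statement) =====
-- stated objective: simpler
-- what changed: Replaces the fused accumulate-with-early-return loop by a find-first-undrawn pass (next over a generator) followed by a separate whole-column summation only in the all-drawn case.
import Mathlib
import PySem

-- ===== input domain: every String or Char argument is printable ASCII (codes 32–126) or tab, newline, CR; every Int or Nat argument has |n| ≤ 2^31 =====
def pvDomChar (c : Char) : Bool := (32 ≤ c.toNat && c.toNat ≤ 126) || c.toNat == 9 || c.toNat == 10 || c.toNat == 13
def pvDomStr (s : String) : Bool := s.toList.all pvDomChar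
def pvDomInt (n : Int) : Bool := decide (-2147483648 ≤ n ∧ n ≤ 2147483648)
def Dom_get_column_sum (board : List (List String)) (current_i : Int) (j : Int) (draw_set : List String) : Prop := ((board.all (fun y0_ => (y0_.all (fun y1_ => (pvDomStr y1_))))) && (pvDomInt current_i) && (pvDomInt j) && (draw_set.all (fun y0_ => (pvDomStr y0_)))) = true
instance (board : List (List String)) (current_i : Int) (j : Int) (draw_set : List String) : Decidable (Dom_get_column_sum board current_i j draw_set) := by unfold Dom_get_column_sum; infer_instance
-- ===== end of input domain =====

-- B replaces A's fused accumulate-with-early-return loop by a find-first-undrawn pass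
-- followed by a separate summation pass in the all-drawn case (objective: simpler decomposition).

-- ===== PORT A =====
-- A's for-loop with early return, as structural recursion; i counts the rows consumed,
-- so at the end i = len(board) and the final return is (sum, i - 1) = (sum, len(board)-1).
-- The 'none' / parse-failure defaults are unreachable inside Pre_ (Python raises there).
def goA (current_i j : Int) (draw_set : List String) : List (List String) → Int → Int → Int × Int
  | [], i, s => (s, i - 1)
  | row :: rest, i, s =>
    match PySem.List.pyGet? row j with
    | some c =>
      if c ∈ draw_set then
        goA current_i j draw_set rest (i + 1) (s + (PySem.Int.ofStr? c).getD 0)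
      else
        (0, current_i + max (i - current_i) 1)
    | none => (0, 0)

def get_column_sum (board : List (List String)) (current_i : Int) (j : Int) (draw_set : List String) : Int × Int :=
  goA current_i j draw_set board 0 0

-- ===== PORT B =====
-- Source B: idx = next((i for i in range(len(board)) if board[i][j] not in draw_set), None)
def bUndrawn (j : Int) (draw_set : List String) (row : List String) : Bool :=
  match PySem.List.pyGet? row j with
  | some c => decide (c ∉ draw_set)
  | none => true   -- Python raises here; unreachable inside Pre_

def get_column_sum_alt (board : List (List String)) (current_i : Int) (j : Int) (draw_set : List String) : Int × Int :=
  match board.findIdx? (bUndrawn j draw_set) with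
  | some idx => (0, current_i + max ((idx : Int) - current_i) 1)
  | none =>
      ((board.map (fun row => (((PySem.List.pyGet? row j).bind PySem.Int.ofStr?).getD 0))).sum,
       (board.length : Int) - 1)

-- ===== PRECONDITION & SPEC =====
-- Pre_: exactly the inputs on which Python A returns: while scanning rows top-down, as long
-- as every earlier cell in column j existed and was drawn, the next cell must exist
-- (no IndexError) and, if drawn, must parse as an int (no ValueError).
def Pre_get_column_sum (board : List (List String)) (current_i : Int) (j : Int) (draw_set : List String) : Prop :=
  ∀ k < board.length,
    (∀ m < k, ∃ s, (board[m]?.bind (fun r => PySem.List.pyGet? r j)) = some s ∧ s ∈ draw_set) →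
    ∃ s, (board[k]?.bind (fun r => PySem.List.pyGet? r j)) = some s ∧
         (s ∈ draw_set → (PySem.Int.ofStr? s).isSome)
instance (board : List (List String)) (current_i : Int) (j : Int) (draw_set : List String) : Decidable (Pre_get_column_sum board current_i j draw_set) := by unfold Pre_get_column_sum; infer_instance

def pvWitness_get_column_sum : List (List String) × Int × Int × List String :=
  ([["1", "7"], ["3", "9"]], 0, 1, ["7", "9"])

def Spec_get_column_sum (board : List (List String)) (current_i : Int) (j : Int) (draw_set : List String) (out : Int × Int) : Prop := out = get_column_sum_alt board current_i j draw_set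
instance (board : List (List String)) (current_i : Int) (j : Int) (draw_set : List String) (out : Int × Int) : Decidable (Spec_get_column_sum board current_i j draw_set out) := by unfold Spec_get_column_sum; infer_instance

-- ===== CLAIM (what is proved, stated in full; the proofs are below) =====
def Claim_equal_get_column_sum : Prop := ∀ (board : List (List String)) (current_i : Int) (j : Int) (draw_set : List String), Dom_get_column_sum board current_i j draw_set → Pre_get_column_sum board current_i j draw_set → Spec_get_column_sum board current_i j draw_set (get_column_sum board current_i j draw_set)

-- ===== LEMMAS AND PROOFS =====

-- The hypothesis restricted to what the induction needs: the cell exists whenever all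
-- earlier cells existed and were drawn.
def CellsOk (j : Int) (draw_set : List String) (board : List (List String)) : Prop :=
  ∀ k < board.length,
    (∀ m < k, ∃ s, (board[m]?.bind (fun r => PySem.List.pyGet? r j)) = some s ∧ s ∈ draw_set) →
    ((board[k]?.bind (fun r => PySem.List.pyGet? r j))).isSome

lemma cellsOk_of_pre (board : List (List String)) (current_i j : Int) (draw_set : List String)
    (h : Pre_get_column_sum board current_i j draw_set) : CellsOk j draw_set board := by
  intro k hk hprev
  obtain ⟨s, hs, _⟩ := h k hk hprev
  simp [hs]

lemma cellsOk_cons (j : Int) (ds : List String) (row : List String) (rest : List (List String))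
    (h : CellsOk j ds (row :: rest)) (c : String) (hc : PySem.List.pyGet? row j = some c)
    (hmem : c ∈ ds) : CellsOk j ds rest := by
  intro k hk hprev
  have := h (k + 1) (by simpa using Nat.succ_lt_succ hk) ?_
  · simpa using this
  · intro m hm
    cases m with
    | zero => exact ⟨c, by simpa using hc, hmem⟩
    | succ m' =>
      obtain ⟨s, hs, hsm⟩ := hprev m' (by omega)
      exact ⟨s, by simpa using hs, hsm⟩

lemma goA_eq (j : Int) (ds : List String) :
    ∀ (board : List (List String)) (current_i i s : Int), CellsOk j ds board →
      goA current_i j ds board i s =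
        match board.findIdx? (bUndrawn j ds) with
        | some k => (0, current_i + max ((i + (k : Int)) - current_i) 1)
        | none => (s + (board.map (fun row => (((PySem.List.pyGet? row j).bind PySem.Int.ofStr?).getD 0))).sum,
                   i + (board.length : Int) - 1) := by
  intro board
  induction board with
  | nil =>
    intro current_i i s _
    simp [goA, List.findIdx?_nil]
  | cons row rest ih =>
    intro current_i i s h
    have h0 := h 0 (by simp) (by intro m hm; omega)
    simp only [List.getElem?_cons_zero, Option.bind_some] at h0
    obtain ⟨c, hc⟩ := Option.isSome_iff_exists.mp (by simpa using h0)
    by_cases hmem : c ∈ ds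
    · have hrest := cellsOk_cons j ds row rest h c hc hmem
      have hrec := ih current_i (i + 1) (s + (PySem.Int.ofStr? c).getD 0) hrest
      have hp : bUndrawn j ds row = false := by simp [bUndrawn, hc, hmem]
      rw [List.findIdx?_cons]
      simp only [hp]
      rw [show goA current_i j ds (row :: rest) i s
            = goA current_i j ds rest (i + 1) (s + (PySem.Int.ofStr? c).getD 0) by
            simp [goA, hc, hmem]]
      rw [hrec]
      cases hfind : rest.findIdx? (bUndrawn j ds) with
      | none =>
        simp [hc]
        constructor
        · ring
        · ring
      | some k =>
        simp
        congr 1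
        ring_nf
    · have hp : bUndrawn j ds row = true := by simp [bUndrawn, hc, hmem]
      rw [List.findIdx?_cons]
      simp only [hp]
      simp [goA, hc, hmem]

-- ===== VERDICT (by name: the statement is the Claim_ definition above) =====
theorem get_column_sum_spec : Claim_equal_get_column_sum := by
  intro board current_i j draw_set _ hpre
  unfold Spec_get_column_sum get_column_sum get_column_sum_alt
  rw [goA_eq j draw_set board current_i 0 0 (cellsOk_of_pre board current_i j draw_set hpre)]
  cases hfind : board.findIdx? (bUndrawn j draw_set) with
  | none => simp
  | some k => simp
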